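-- pv_equiv track=rewrite | github.com/NaciCankaya/Floating_point_noise_GPU_verification | experiments/cross-hardware_verifiability/batch_size/transformers/teacher_forcing_transformers.py | format_kernel_classes
-- ===== SOURCE A (Python) =====
-- def format_kernel_classes(equivalent_pairs, batch_sizes):
--     """
--     Group batch sizes into kernel equivalence classes.
--     """
--     parent = {bs: bs for bs in batch_sizes}
--
--     def find(x):
--         if parent[x] != x:
--             parent[x] = find(parent[x])
--         return parent[x]
--
--     def union(x, y):
--         px, py = find(x), find(y)
--         if px != py:
--             parent[px] = py
--
--     for bs1, bs2 in equivalent_pairs: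
--         union(bs1, bs2)
--
--     groups = {}
--     for bs in batch_sizes:
--         root = find(bs)
--         if root not in groups:
--             groups[root] = set()
--         groups[root].add(bs)
--
--     return list(groups.values())
-- ===== SOURCE B (Python) =====
-- def format_kernel_classes(equivalent_pairs, batch_sizes):
--     """
--     Group batch sizes into kernel equivalence classes.
--
--     Alternative algorithm: keep a flat class-label table and globally
--     relabel one class onto the other for each equivalent pair (no
--     parent forest, no recursion), then group by final label.
--     """
--     cid = {bs: bs for bs in batch_sizes}
--     for a, b in equivalent_pairs:
--         ra, rb = cid[a], cid[b]
--         if ra != rb: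
--             for k in cid:
--                 if cid[k] == ra:
--                     cid[k] = rb
--     groups = {}
--     for bs in batch_sizes:
--         groups.setdefault(cid[bs], set()).add(bs)
--     return list(groups.values())
-- ===== Notes on version B (the rewrite author's own statement) =====
-- stated objective: alternative
-- what changed: Replaced the recursive union-find with path compression by a flat class-label table that is globally relabelled (one linear scan) for each merging pair, then grouped by final label; no parent forest, no recursion.
import Mathlib
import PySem

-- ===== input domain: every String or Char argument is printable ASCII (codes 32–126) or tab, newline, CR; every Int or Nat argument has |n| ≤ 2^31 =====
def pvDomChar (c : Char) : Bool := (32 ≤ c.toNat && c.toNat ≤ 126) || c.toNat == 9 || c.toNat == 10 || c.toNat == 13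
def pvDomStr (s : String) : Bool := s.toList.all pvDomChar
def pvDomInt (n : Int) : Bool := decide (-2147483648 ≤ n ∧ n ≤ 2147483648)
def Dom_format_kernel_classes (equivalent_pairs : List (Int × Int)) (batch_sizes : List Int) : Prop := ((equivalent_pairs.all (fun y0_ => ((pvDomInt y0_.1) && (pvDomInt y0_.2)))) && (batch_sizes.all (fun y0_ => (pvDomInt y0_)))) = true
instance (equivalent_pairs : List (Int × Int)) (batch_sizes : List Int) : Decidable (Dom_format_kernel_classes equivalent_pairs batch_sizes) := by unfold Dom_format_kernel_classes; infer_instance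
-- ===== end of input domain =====

-- B replaces A's recursive union-find by a flat label table with a global relabel per pair
-- (a genuinely different algorithm of similar size; not claimed faster).

-- ===== PORT A =====
-- find(x) with path compression; fuel makes the recursion total, `none` = KeyError/unreachable.
def pvFind (fuel : Nat) (p : PySem.Dict Int Int) (x : Int) : Option (Int × PySem.Dict Int Int) :=
  match fuel with
  | 0 => none
  | fuel + 1 =>
    match p.get? x with
    | none => none
    | some px =>
      if px ≠ x then
        match pvFind fuel p px with
        | none => none
        | some (r, p') => some (r, p'.insert x r)
      else some (x, p)

def pvUnion (p : PySem.Dict Int Int) (a b : Int) : Option (PySem.Dict Int Int) :=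
  match pvFind (p.size + 1) p a with
  | none => none
  | some (pa, p1) =>
    match pvFind (p1.size + 1) p1 b with
    | none => none
    | some (pb, p2) => if pa ≠ pb then some (p2.insert pa pb) else some p2

def pvPairStepA (st : Option (PySem.Dict Int Int)) (pr : Int × Int) : Option (PySem.Dict Int Int) :=
  match st with
  | none => none
  | some p => pvUnion p pr.1 pr.2

def pvGroupStepA (st : Option (PySem.Dict Int Int × PySem.Dict Int (PySem.Set Int)))
    (bs : Int) : Option (PySem.Dict Int Int × PySem.Dict Int (PySem.Set Int)) :=
  match st with
  | none => none
  | some (p, g) =>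
    match pvFind (p.size + 1) p bs with
    | none => none
    | some (r, p') =>
      let g1 := if g.contains r then g else g.insert r ([] : PySem.Set Int)
      some (p', g1.modify r [] (fun s => PySem.Set.add s bs))

def format_kernel_classes (equivalent_pairs : List (Int × Int)) (batch_sizes : List Int) : List (List Int) :=
  let parent := batch_sizes.foldl (fun d bs => d.insert bs bs) PySem.Dict.empty
  match equivalent_pairs.foldl pvPairStepA (some parent) with
  | none => []
  | some p1 =>
    match batch_sizes.foldl pvGroupStepA (some (p1, (PySem.Dict.empty : PySem.Dict Int (PySem.Set Int)))) with
    | none => []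
    | some (_, g) => g.values

-- ===== PORT B =====
-- for k in cid: if cid[k] == ra: cid[k] = rb
def pvRelabel (c : PySem.Dict Int Int) (ra rb : Int) : PySem.Dict Int Int :=
  c.keys.foldl (fun d k =>
    match d.get? k with
    | some v => if v = ra then d.insert k rb else d
    | none => d) c

def pvPairStepB (st : Option (PySem.Dict Int Int)) (pr : Int × Int) : Option (PySem.Dict Int Int) :=
  match st with
  | none => none
  | some c =>
    match c.get? pr.1, c.get? pr.2 with
    | some ra, some rb => some (if ra ≠ rb then pvRelabel c ra rb else c)
    | _, _ => none

def pvGroupStepB (cid : PySem.Dict Int Int) (st : Option (PySem.Dict Int (PySem.Set Int)))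
    (bs : Int) : Option (PySem.Dict Int (PySem.Set Int)) :=
  match st with
  | none => none
  | some g =>
    match cid.get? bs with
    | none => none
    | some r => some ((g.setdefault r ([] : PySem.Set Int)).modify r [] (fun s => PySem.Set.add s bs))

def format_kernel_classes_alt (equivalent_pairs : List (Int × Int)) (batch_sizes : List Int) : List (List Int) :=
  let cid0 := batch_sizes.foldl (fun d bs => d.insert bs bs) PySem.Dict.empty
  match equivalent_pairs.foldl pvPairStepB (some cid0) with
  | none => []
  | some cid =>
    match batch_sizes.foldl (pvGroupStepB cid) (some (PySem.Dict.empty : PySem.Dict Int (PySem.Set Int))) with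
    | none => []
    | some g => g.values

-- ===== PRECONDITION & SPEC =====
-- Pre_ excludes exactly the inputs where a pair mentions a value absent from batch_sizes: there
-- A raises KeyError (parent[x]) and B raises KeyError (cid[a]).
def Pre_format_kernel_classes (equivalent_pairs : List (Int × Int)) (batch_sizes : List Int) : Prop :=
  ∀ pr ∈ equivalent_pairs, pr.1 ∈ batch_sizes ∧ pr.2 ∈ batch_sizes
instance (equivalent_pairs : List (Int × Int)) (batch_sizes : List Int) : Decidable (Pre_format_kernel_classes equivalent_pairs batch_sizes) := by unfold Pre_format_kernel_classes; infer_instance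

def pvWitness_format_kernel_classes : (List (Int × Int)) × List Int := ([(1, 2)], [1, 2, 3])

def Spec_format_kernel_classes (equivalent_pairs : List (Int × Int)) (batch_sizes : List Int) (out : List (List Int)) : Prop := out = format_kernel_classes_alt equivalent_pairs batch_sizes
instance (equivalent_pairs : List (Int × Int)) (batch_sizes : List Int) (out : List (List Int)) : Decidable (Spec_format_kernel_classes equivalent_pairs batch_sizes out) := by unfold Spec_format_kernel_classes; infer_instance

-- ===== CLAIM (what is proved, stated in full; the proofs are below) =====
def Claim_equal_format_kernel_classes : Prop := ∀ (equivalent_pairs : List (Int × Int)) (batch_sizes : List Int), Dom_format_kernel_classes equivalent_pairs batch_sizes → Pre_format_kernel_classes equivalent_pairs batch_sizes → Spec_format_kernel_classes equivalent_pairs batch_sizes (format_kernel_classes equivalent_pairs batch_sizes)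

-- ===== LEMMAS AND PROOFS =====

-- one step of the parent forest: parent.get(x, x)
def pvStep (p : PySem.Dict Int Int) (x : Int) : Int := p.getD x x

def pvStepN (p : PySem.Dict Int Int) : Nat → Int → Int
  | 0, x => x
  | n + 1, x => pvStepN p n (pvStep p x)

def pvIsRoot (p : PySem.Dict Int Int) (r : Int) : Prop := pvStep p r = r

def pvWF (p : PySem.Dict Int Int) : Prop :=
  p.keys.Nodup ∧ ∀ k ∈ p.keys, pvStep p k ∈ p.keys ∧ ∃ n, pvIsRoot p (pvStepN p n k)

def pvRoot (p : PySem.Dict Int Int) (x : Int) : Int := pvStepN p p.keys.length x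

theorem pvStepN_add (p : PySem.Dict Int Int) (m n : Nat) (x : Int) :
    pvStepN p (m + n) x = pvStepN p n (pvStepN p m x) := by
  induction m generalizing x with
  | zero => simp [pvStepN]
  | succ m ih =>
      have : m + 1 + n = (m + n) + 1 := by omega
      rw [this]
      simp only [pvStepN]
      exact ih (pvStep p x)

theorem pvIsRoot_stepN (p : PySem.Dict Int Int) (r : Int) (h : pvIsRoot p r) (m : Nat) :
    pvStepN p m r = r := by
  induction m with
  | zero => rfl
  | succ m ih => simp only [pvStepN, pvIsRoot] at *; rw [h, ih]

theorem pvStepN_stable (p : PySem.Dict Int Int) (n m : Nat) (x : Int)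
    (h : pvIsRoot p (pvStepN p n x)) (hle : n ≤ m) : pvStepN p m x = pvStepN p n x := by
  obtain ⟨k, rfl⟩ : ∃ k, m = n + k := ⟨m - n, by omega⟩
  rw [pvStepN_add]
  exact pvIsRoot_stepN p _ h k

theorem pvStepN_mem (p : PySem.Dict Int Int) (hcl : ∀ k ∈ p.keys, pvStep p k ∈ p.keys)
    (x : Int) (hx : x ∈ p.keys) (n : Nat) : pvStepN p n x ∈ p.keys := by
  induction n generalizing x with
  | zero => exact hx
  | succ n ih => exact ih (pvStep p x) (hcl x hx)

theorem pvStep_not_mem (p : PySem.Dict Int Int) (x : Int) (hx : x ∉ p.keys) : pvStep p x = x := by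
  unfold pvStep
  have h : p.get? x = none := (PySem.Dict.get?_eq_none_iff_not_mem_keys p x).mpr hx
  rw [PySem.Dict.getD_eq_get?_getD, h]
  rfl

theorem pvRoot_not_mem (p : PySem.Dict Int Int) (x : Int) (hx : x ∉ p.keys) : pvRoot p x = x := by
  unfold pvRoot
  exact pvIsRoot_stepN p x (pvStep_not_mem p x hx) _

-- pigeonhole: the minimal distance-to-root fits inside the key set
theorem pvReach (p : PySem.Dict Int Int) (_hnd : p.keys.Nodup)
    (hcl : ∀ k ∈ p.keys, pvStep p k ∈ p.keys) (x : Int) (hx : x ∈ p.keys)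
    (hex : ∃ n, pvIsRoot p (pvStepN p n x)) :
    ∃ d, d + 1 ≤ p.keys.length ∧ pvIsRoot p (pvStepN p d x) := by
  haveI : DecidablePred (fun n => pvIsRoot p (pvStepN p n x)) := by
    intro n; unfold pvIsRoot; infer_instance
  set d := Nat.find hex with hd
  have hroot : pvIsRoot p (pvStepN p d x) := Nat.find_spec hex
  refine ⟨d, ?_, hroot⟩
  have hinj : ∀ i j, i < j → j ≤ d → pvStepN p i x ≠ pvStepN p j x := by
    intro i j hij hjd heq
    have hper : pvStepN p (i + (d - j)) x = pvStepN p d x := by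
      have h1 : pvStepN p (i + (d - j)) x = pvStepN p (d - j) (pvStepN p i x) := pvStepN_add ..
      have h2 : pvStepN p (j + (d - j)) x = pvStepN p (d - j) (pvStepN p j x) := pvStepN_add ..
      have h3 : j + (d - j) = d := by omega
      rw [h1, heq, ← h2, h3]
    have : pvIsRoot p (pvStepN p (i + (d - j)) x) := by rw [hper]; exact hroot
    exact absurd this (Nat.find_min hex (by omega))
  have hnodL : ((List.range (d + 1)).map (fun i => pvStepN p i x)).Nodup := by
    have hpl : (List.range (d + 1)).Pairwise (· < ·) := List.pairwise_lt_range
    have : (List.range (d + 1)).Pairwise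
        (fun i j => pvStepN p i x ≠ pvStepN p j x) := by
      refine hpl.imp_of_mem ?_
      intro i j hi hj hij
      exact hinj i j hij (by have := List.mem_range.mp hj; omega)
    exact this.map _ (fun a b h => h)
  have hsub : ((List.range (d + 1)).map (fun i => pvStepN p i x)) ⊆ p.keys := by
    intro z hz
    obtain ⟨i, _, rfl⟩ := List.mem_map.mp hz
    exact pvStepN_mem p hcl x hx i
  have := (List.subperm_of_subset hnodL hsub).length_le
  simpa using this

theorem pvRoot_eq_stepN (p : PySem.Dict Int Int) (x : Int) (n : Nat)
    (h : pvIsRoot p (pvStepN p n x)) (hle : n ≤ p.keys.length) :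
    pvRoot p x = pvStepN p n x := pvStepN_stable p n _ x h hle

theorem pvRoot_isRoot (p : PySem.Dict Int Int) (hwf : pvWF p) (x : Int) (hx : x ∈ p.keys) :
    pvIsRoot p (pvRoot p x) := by
  obtain ⟨d, hdle, hroot⟩ := pvReach p hwf.1 (fun k hk => (hwf.2 k hk).1) x hx ((hwf.2 x hx).2)
  rw [pvRoot_eq_stepN p x d hroot (by omega)]
  exact hroot

theorem pvRoot_of_isRoot (p : PySem.Dict Int Int) (x : Int) (h : pvIsRoot p x) :
    pvRoot p x = x := pvIsRoot_stepN p x h _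

theorem pvRoot_mem (p : PySem.Dict Int Int) (hwf : pvWF p) (x : Int) (hx : x ∈ p.keys) :
    pvRoot p x ∈ p.keys := pvStepN_mem p (fun k hk => (hwf.2 k hk).1) x hx _

theorem pvRoot_step (p : PySem.Dict Int Int) (hwf : pvWF p) (x : Int) (hx : x ∈ p.keys)
    (h : ¬ pvIsRoot p x) : pvRoot p (pvStep p x) = pvRoot p x := by
  obtain ⟨d, hdle, hroot⟩ := pvReach p hwf.1 (fun k hk => (hwf.2 k hk).1) x hx ((hwf.2 x hx).2)
  match d, hroot with
  | 0, hroot => exact absurd hroot h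
  | d + 1, hroot =>
      have h1 : pvStepN p (d + 1) x = pvStepN p d (pvStep p x) := rfl
      rw [h1] at hroot
      rw [pvRoot_eq_stepN p (pvStep p x) d hroot (by omega),
          pvRoot_eq_stepN p x (d + 1) (by rw [h1]; exact hroot) (by omega), h1]

theorem pvStep_insert (p : PySem.Dict Int Int) (k v y : Int) :
    pvStep (p.insert k v) y = if y = k then v else pvStep p y := by
  unfold pvStep
  rw [PySem.Dict.getD_insert]

-- linking lemma: inserting x ↦ t (t a root; x a root, or t = root of x) rewires exactly x's class
theorem pvLink (p : PySem.Dict Int Int) (x t : Int) (hwf : pvWF p) (hx : x ∈ p.keys)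
    (ht : t ∈ p.keys) (hrt : pvIsRoot p t)
    (hcase : pvRoot p x = x ∨ t = pvRoot p x) :
    (p.insert x t).keys = p.keys ∧ pvWF (p.insert x t) ∧
    ∀ y, pvRoot (p.insert x t) y =
      if pvRoot p y = pvRoot p x then pvRoot p t else pvRoot p y := by
  have hcl : ∀ k ∈ p.keys, pvStep p k ∈ p.keys := fun k hk => (hwf.2 k hk).1
  have hkeys : (p.insert x t).keys = p.keys :=
    PySem.Dict.keys_insert_of_contains p t ((PySem.Dict.contains_iff_mem_keys p x).mpr hx)
  have hstepQ : ∀ y, pvStep (p.insert x t) y = if y = x then t else pvStep p y :=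
    fun y => pvStep_insert p x t y
  have hQt : pvIsRoot (p.insert x t) t := by
    unfold pvIsRoot; rw [hstepQ]; split
    · rfl
    · exact hrt
  have hrtp : pvRoot p t = t := pvRoot_of_isRoot p t hrt
  -- root-node case of the chain claim
  have Croot : ∀ y ∈ p.keys, pvIsRoot p y → ∃ n, n ≤ 1 ∧
      pvIsRoot (p.insert x t) (pvStepN (p.insert x t) n y) ∧
      pvStepN (p.insert x t) n y =
        (if pvRoot p y = pvRoot p x then pvRoot p t else pvRoot p y) := by
    intro y hy hyroot
    have hrpy : pvRoot p y = y := pvRoot_of_isRoot p y hyroot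
    by_cases hyx : y = x
    · subst hyx
      refine ⟨1, by omega, ?_, ?_⟩
      · have h0 : pvStep (p.insert y t) y = t := by rw [hstepQ]; simp
        show pvIsRoot (p.insert y t) (pvStepN (p.insert y t) 1 y)
        simpa [pvStepN, h0] using hQt
      · have h0 : pvStep (p.insert y t) y = t := by rw [hstepQ]; simp
        simp [pvStepN, h0, hrpy, hrtp]
    · refine ⟨0, by omega, ?_, ?_⟩
      · show pvIsRoot (p.insert x t) (pvStepN (p.insert x t) 0 y)
        unfold pvIsRoot pvStepN; rw [hstepQ]; simpa [hyx] using hyroot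
      · show y = _
        by_cases hrx : pvRoot p y = pvRoot p x
        · rw [if_pos hrx]
          rcases hcase with hc | hc
          · exact absurd (hrpy ▸ hrx ▸ hc) hyx
          · have : t = y := by rw [hc, ← hrx, hrpy]
            rw [← this, hrtp]
        · rw [if_neg hrx, hrpy]
  have C : ∀ (d : Nat) (y : Int), y ∈ p.keys → pvIsRoot p (pvStepN p d y) → ∃ n, n ≤ d + 1 ∧
      pvIsRoot (p.insert x t) (pvStepN (p.insert x t) n y) ∧
      pvStepN (p.insert x t) n y =
        (if pvRoot p y = pvRoot p x then pvRoot p t else pvRoot p y) := by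
    intro d
    induction d with
    | zero =>
        intro y hy hroot
        obtain ⟨n, hn, h1, h2⟩ := Croot y hy hroot
        exact ⟨n, by omega, h1, h2⟩
    | succ d ih =>
        intro y hy hroot
        by_cases hyroot : pvIsRoot p y
        · obtain ⟨n, hn, h1, h2⟩ := Croot y hy hyroot
          exact ⟨n, by omega, h1, h2⟩
        · by_cases hyx : y = x
          · subst hyx
            rcases hcase with hc | hc
            · exact absurd (hc ▸ pvRoot_isRoot p hwf y hy) hyroot
            · refine ⟨1, by omega, ?_, ?_⟩
              · have h0 : pvStep (p.insert y t) y = t := by rw [hstepQ]; simp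
                show pvIsRoot (p.insert y t) (pvStepN (p.insert y t) 1 y)
                simpa [pvStepN, h0] using hQt
              · have h0 : pvStep (p.insert y t) y = t := by rw [hstepQ]; simp
                simp [pvStepN, h0, hrtp]
          · have hsy : pvStep p y ∈ p.keys := hcl y hy
            have hroot' : pvIsRoot p (pvStepN p d (pvStep p y)) := hroot
            obtain ⟨n, hn, h1, h2⟩ := ih (pvStep p y) hsy hroot'
            have hQstep : pvStep (p.insert x t) y = pvStep p y := by rw [hstepQ]; simp [hyx]
            refine ⟨n + 1, by omega, ?_, ?_⟩
            · show pvIsRoot (p.insert x t) (pvStepN (p.insert x t) n (pvStep (p.insert x t) y))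
              rw [hQstep]; exact h1
            · show pvStepN (p.insert x t) n (pvStep (p.insert x t) y) = _
              rw [hQstep, h2, pvRoot_step p hwf y hy hyroot]
  have hreachQ : ∀ y ∈ p.keys, ∃ n, n ≤ p.keys.length ∧
      pvIsRoot (p.insert x t) (pvStepN (p.insert x t) n y) ∧
      pvStepN (p.insert x t) n y =
        (if pvRoot p y = pvRoot p x then pvRoot p t else pvRoot p y) := by
    intro y hy
    obtain ⟨d, hdle, hroot⟩ := pvReach p hwf.1 hcl y hy ((hwf.2 y hy).2)
    obtain ⟨n, hn, h1, h2⟩ := C d y hy hroot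
    exact ⟨n, by omega, h1, h2⟩
  refine ⟨hkeys, ⟨hkeys ▸ hwf.1, ?_⟩, ?_⟩
  · intro k hk
    rw [hkeys] at hk
    constructor
    · rw [hkeys, hstepQ]
      split
      · exact ht
      · exact hcl k hk
    · obtain ⟨n, _, h1, _⟩ := hreachQ k hk
      exact ⟨n, h1⟩
  · intro y
    by_cases hy : y ∈ p.keys
    · obtain ⟨n, hn, h1, h2⟩ := hreachQ y hy
      have hlen : (p.insert x t).keys.length = p.keys.length := by rw [hkeys]
      calc pvRoot (p.insert x t) y
          = pvStepN (p.insert x t) n y := by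
            unfold pvRoot; rw [hlen]; exact pvStepN_stable _ n _ y h1 hn
        _ = _ := h2
    · have h1 : pvRoot (p.insert x t) y = y := pvRoot_not_mem _ y (by rw [hkeys]; exact hy)
      have h2 : pvRoot p y = y := pvRoot_not_mem p y hy
      have hne : pvRoot p y ≠ pvRoot p x ∨ pvRoot p t = y := by
        by_cases hrx : pvRoot p y = pvRoot p x
        · right
          have := pvRoot_mem p hwf x hx
          rw [← hrx, h2] at this
          exact absurd this hy
        · left; exact hrx
      rcases hne with hne | hne
      · rw [h1, if_neg hne, h2]
      · rw [h1]; split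
        · rw [hne]
        · exact h2.symm

theorem pvGet_mem (p : PySem.Dict Int Int) (x : Int) (hx : x ∈ p.keys) :
    p.get? x = some (pvStep p x) := by
  cases h : p.get? x with
  | none => exact absurd ((PySem.Dict.get?_eq_none_iff_not_mem_keys p x).mp h) (by simpa using hx)
  | some v =>
      have : pvStep p x = v := by
        unfold pvStep
        rw [PySem.Dict.getD_eq_get?_getD, h]
        rfl
      rw [this]

theorem pvFind_root (p : PySem.Dict Int Int) (x : Int) (f : Nat) (hx : x ∈ p.keys)
    (hxr : pvIsRoot p x) : pvFind (f + 1) p x = some (pvRoot p x, p) := by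
  have hget : p.get? x = some x := by rw [pvGet_mem p x hx, hxr]
  simp only [pvFind, hget]
  rw [if_neg (by simp), pvRoot_of_isRoot p x hxr]

theorem pvFind_spec : ∀ (n : Nat) (p : PySem.Dict Int Int) (x : Int) (fuel : Nat),
    pvWF p → x ∈ p.keys → pvIsRoot p (pvStepN p n x) → n < fuel →
    ∃ p', pvFind fuel p x = some (pvRoot p x, p') ∧ p'.keys = p.keys ∧ pvWF p' ∧
      ∀ y, pvRoot p' y = pvRoot p y := by
  intro n
  induction n with
  | zero =>
      intro p x fuel hwf hx hroot hfuel
      match fuel, hfuel with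
      | f + 1, _ =>
        exact ⟨p, pvFind_root p x f hx hroot, rfl, hwf, fun y => rfl⟩
  | succ m ih =>
      intro p x fuel hwf hx hroot hfuel
      by_cases hxr : pvIsRoot p x
      · match fuel, hfuel with
        | f + 1, _ =>
          exact ⟨p, pvFind_root p x f hx hxr, rfl, hwf, fun y => rfl⟩
      · match fuel, hfuel with
        | f + 1, hfuel =>
          have hget : p.get? x = some (pvStep p x) := pvGet_mem p x hx
          have hne : pvStep p x ≠ x := hxr
          have hpx : pvStep p x ∈ p.keys := (hwf.2 x hx).1
          have hroot' : pvIsRoot p (pvStepN p m (pvStep p x)) := hroot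
          obtain ⟨p', hfind, hk, hwf', hr⟩ :=
            ih p (pvStep p x) f hwf hpx hroot' (by omega)
          have hrx : pvRoot p (pvStep p x) = pvRoot p x := pvRoot_step p hwf x hx hxr
          have hrroot : pvIsRoot p (pvRoot p x) := pvRoot_isRoot p hwf x hx
          have hrmem : pvRoot p x ∈ p.keys := pvRoot_mem p hwf x hx
          have hrootp' : pvIsRoot p' (pvRoot p x) := by
            have h1 : pvRoot p' (pvRoot p x) = pvRoot p x := by
              rw [hr, pvRoot_of_isRoot p _ hrroot]
            have := pvRoot_isRoot p' hwf' (pvRoot p x) (by rw [hk]; exact hrmem)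
            rwa [h1] at this
          obtain ⟨hk2, hwf2, hr2⟩ := pvLink p' x (pvRoot p x) hwf' (by rw [hk]; exact hx)
            (by rw [hk]; exact hrmem) hrootp'
            (Or.inr (by rw [hr]))
          refine ⟨p'.insert x (pvRoot p x), ?_, by rw [hk2, hk], hwf2, ?_⟩
          · simp only [pvFind, hget, if_pos hne, hfind, hrx]
          · intro y
            rw [hr2 y, hr y, hr x]
            by_cases hcy : pvRoot p y = pvRoot p x
            · rw [if_pos hcy, hr _, pvRoot_of_isRoot p _ hrroot, hcy]
            · rw [if_neg hcy]

theorem pvSize_eq (p : PySem.Dict Int Int) : p.keys.length = p.size := by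
  simp [PySem.Dict.keys, PySem.Dict.size]

theorem pvFindTop_spec (p : PySem.Dict Int Int) (x : Int) (hwf : pvWF p) (hx : x ∈ p.keys) :
    ∃ p', pvFind (p.size + 1) p x = some (pvRoot p x, p') ∧ p'.keys = p.keys ∧ pvWF p' ∧
      ∀ y, pvRoot p' y = pvRoot p y := by
  obtain ⟨d, hdle, hroot⟩ := pvReach p hwf.1 (fun k hk => (hwf.2 k hk).1) x hx ((hwf.2 x hx).2)
  have hs : p.keys.length = p.size := pvSize_eq p
  exact pvFind_spec d p x (p.size + 1) hwf hx hroot (by omega)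

theorem pvUnion_spec (p : PySem.Dict Int Int) (a b : Int) (hwf : pvWF p)
    (ha : a ∈ p.keys) (hb : b ∈ p.keys) :
    ∃ q, pvUnion p a b = some q ∧ q.keys = p.keys ∧ pvWF q ∧
      ∀ y, pvRoot q y = if pvRoot p y = pvRoot p a then pvRoot p b else pvRoot p y := by
  obtain ⟨p1, hf1, hk1, hwf1, hr1⟩ := pvFindTop_spec p a hwf ha
  obtain ⟨p2, hf2, hk2, hwf2, hr2⟩ := pvFindTop_spec p1 b hwf1 (by rw [hk1]; exact hb)
  have hr12 : ∀ y, pvRoot p2 y = pvRoot p y := fun y => (hr2 y).trans (hr1 y)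
  have hra : pvIsRoot p (pvRoot p a) := pvRoot_isRoot p hwf a ha
  have hrbr : pvIsRoot p (pvRoot p b) := pvRoot_isRoot p hwf b hb
  have hfix : ∀ z, pvIsRoot p z → pvRoot p2 z = z := fun z hz => by
    rw [hr12, pvRoot_of_isRoot p z hz]
  by_cases hne : pvRoot p a = pvRoot p b
  · refine ⟨p2, ?_, by rw [hk2, hk1], hwf2, ?_⟩
    · simp only [pvUnion, hf1, hf2, hr1 b]
      rw [if_neg (by simpa using hne)]
    · intro y
      rw [hr12]
      by_cases hcy : pvRoot p y = pvRoot p a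
      · rw [if_pos hcy, hcy, hne]
      · rw [if_neg hcy]
  · have hpamem : pvRoot p a ∈ p2.keys := by
      rw [hk2, hk1]; exact pvRoot_mem p hwf a ha
    have hpbmem : pvRoot p b ∈ p2.keys := by
      rw [hk2, hk1]; exact pvRoot_mem p hwf b hb
    have hrootb2 : pvIsRoot p2 (pvRoot p b) := by
      have := pvRoot_isRoot p2 hwf2 (pvRoot p b) hpbmem
      rwa [hfix _ hrbr] at this
    obtain ⟨hk3, hwf3, hr3⟩ := pvLink p2 (pvRoot p a) (pvRoot p b) hwf2 hpamem hpbmem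
      hrootb2 (Or.inl (hfix _ hra))
    refine ⟨p2.insert (pvRoot p a) (pvRoot p b), ?_, by rw [hk3, hk2, hk1], hwf3, ?_⟩
    · simp only [pvUnion, hf1, hf2, hr1 b]
      rw [if_pos (by simpa using hne)]
    · intro y
      rw [hr3 y, hr12 y, hfix _ hra, hfix _ hrbr]

-- B's invariant: cid stores exactly A's final roots
def pvInv (p c : PySem.Dict Int Int) : Prop :=
  c.keys = p.keys ∧ ∀ y ∈ p.keys, c.get? y = some (pvRoot p y)

theorem pvRelabel_keys (ra rb : Int) : ∀ (L : List Int) (d : PySem.Dict Int Int),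
    (∀ k ∈ L, k ∈ d.keys) →
    (L.foldl (fun d k => match d.get? k with
      | some v => if v = ra then d.insert k rb else d
      | none => d) d).keys = d.keys := by
  intro L
  induction L with
  | nil => intro d _; rfl
  | cons k rest ih =>
      intro d hmem
      have hkmem : k ∈ d.keys := hmem k (by simp)
      simp only [List.foldl_cons]
      cases hg : d.get? k with
      | none =>
          exact ih d (fun z hz => hmem z (by simp [hz]))
      | some v =>
          by_cases hv : v = ra
          · simp only [if_pos hv]
            have hki : (d.insert k rb).keys = d.keys :=
              PySem.Dict.keys_insert_of_contains d rb
                ((PySem.Dict.contains_iff_mem_keys d k).mpr hkmem)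
            rw [ih (d.insert k rb) (fun z hz => by rw [hki]; exact hmem z (by simp [hz])), hki]
          · simp only [if_neg hv]
            exact ih d (fun z hz => hmem z (by simp [hz]))

theorem pvRelabel_get? (ra rb : Int) : ∀ (L : List Int) (d : PySem.Dict Int Int) (y : Int),
    L.Nodup → (∀ k ∈ L, k ∈ d.keys) →
    (L.foldl (fun d k => match d.get? k with
      | some v => if v = ra then d.insert k rb else d
      | none => d) d).get? y =
      if y ∈ L ∧ d.get? y = some ra then some rb else d.get? y := by
  intro L
  induction L with
  | nil => intro d y _ _; simp
  | cons k rest ih =>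
      intro d y hnd hmem
      have hkmem : k ∈ d.keys := hmem k (by simp)
      have hknr : k ∉ rest := by simp at hnd; exact hnd.1
      have hndr : rest.Nodup := by simp at hnd; exact hnd.2
      simp only [List.foldl_cons]
      cases hg : d.get? k with
      | none =>
          rw [ih d y hndr (fun z hz => hmem z (by simp [hz]))]
          by_cases hyk : y = k
          · subst hyk
            simp [hknr, hg]
          · simp [List.mem_cons, hyk]
      | some v =>
          by_cases hv : v = ra
          · subst hv
            simp only [if_true]
            have hki : (d.insert k rb).keys = d.keys :=
              PySem.Dict.keys_insert_of_contains d rb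
                ((PySem.Dict.contains_iff_mem_keys d k).mpr hkmem)
            rw [ih (d.insert k rb) y hndr (fun z hz => by rw [hki]; exact hmem z (by simp [hz]))]
            by_cases hyk : y = k
            · subst hyk
              simp [hknr, PySem.Dict.get?_insert_self, hg]
            · rw [PySem.Dict.get?_insert_of_ne d rb hyk]
              simp [List.mem_cons, hyk]
          · simp only [if_neg hv]
            rw [ih d y hndr (fun z hz => hmem z (by simp [hz]))]
            by_cases hyk : y = k
            · subst hyk
              simp [hknr, hg, hv]
            · simp [List.mem_cons, hyk]

theorem pvPairs_fold : ∀ (eps : List (Int × Int)) (p c : PySem.Dict Int Int),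
    pvWF p → pvInv p c → (∀ pr ∈ eps, pr.1 ∈ p.keys ∧ pr.2 ∈ p.keys) →
    ∃ p' c', eps.foldl pvPairStepA (some p) = some p' ∧
      eps.foldl pvPairStepB (some c) = some c' ∧
      pvWF p' ∧ p'.keys = p.keys ∧ pvInv p' c' := by
  intro eps
  induction eps with
  | nil => intro p c hwf hinv _; exact ⟨p, c, rfl, rfl, hwf, rfl, hinv⟩
  | cons pr rest ih =>
      intro p c hwf hinv hmem
      obtain ⟨ha, hb⟩ := hmem pr (by simp)
      obtain ⟨q, hq, hkq, hwfq, hrq⟩ := pvUnion_spec p pr.1 pr.2 hwf ha hb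
      have hga : c.get? pr.1 = some (pvRoot p pr.1) := hinv.2 pr.1 ha
      have hgb : c.get? pr.2 = some (pvRoot p pr.2) := hinv.2 pr.2 hb
      have hckeys : c.keys = p.keys := hinv.1
      by_cases hne : pvRoot p pr.1 = pvRoot p pr.2
      · -- no relabel
        have hinv' : pvInv q c := by
          refine ⟨hckeys.trans hkq.symm, fun y hy => ?_⟩
          rw [hkq] at hy
          rw [hinv.2 y hy, hrq y]
          by_cases hcy : pvRoot p y = pvRoot p pr.1
          · rw [if_pos hcy, hcy, hne]
          · rw [if_neg hcy]
        obtain ⟨p', c', hA, hB, hwf', hk', hinv''⟩ :=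
          ih q c hwfq hinv' (fun z hz => by
            rw [hkq]; exact hmem z (by simp [hz]))
        refine ⟨p', c', ?_, ?_, hwf', hk'.trans hkq, hinv''⟩
        · simp only [List.foldl_cons, pvPairStepA, hq, hA]
        · simp only [List.foldl_cons, pvPairStepB, hga, hgb, if_neg (not_not_intro hne), hB]
      · -- relabel
        have hrelk : (pvRelabel c (pvRoot p pr.1) (pvRoot p pr.2)).keys = c.keys :=
          pvRelabel_keys _ _ c.keys c (fun z hz => hz)
        have hrelg : ∀ y, (pvRelabel c (pvRoot p pr.1) (pvRoot p pr.2)).get? y =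
            if y ∈ c.keys ∧ c.get? y = some (pvRoot p pr.1) then some (pvRoot p pr.2)
            else c.get? y :=
          fun y => pvRelabel_get? _ _ c.keys c y (hckeys ▸ hwf.1) (fun z hz => hz)
        have hinv' : pvInv q (pvRelabel c (pvRoot p pr.1) (pvRoot p pr.2)) := by
          refine ⟨(hrelk.trans hckeys).trans hkq.symm, fun y hy => ?_⟩
          rw [hkq] at hy
          rw [hrelg y, hinv.2 y hy, hrq y]
          by_cases hcy : pvRoot p y = pvRoot p pr.1
          · rw [if_pos hcy, if_pos ⟨hckeys ▸ hy, by rw [hcy]⟩]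
          · rw [if_neg hcy, if_neg (by
              rintro ⟨-, h2⟩
              exact hcy (Option.some.inj h2))]
        obtain ⟨p', c', hA, hB, hwf', hk', hinv''⟩ :=
          ih q _ hwfq hinv' (fun z hz => by
            rw [hkq]; exact hmem z (by simp [hz]))
        refine ⟨p', c', ?_, ?_, hwf', hk'.trans hkq, hinv''⟩
        · simp only [List.foldl_cons, pvPairStepA, hq, hA]
        · simp only [List.foldl_cons, pvPairStepB, hga, hgb, if_pos hne, hB]

theorem pvGroup_fold : ∀ (L : List Int) (p c : PySem.Dict Int Int)
    (g : PySem.Dict Int (PySem.Set Int)),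
    pvWF p → pvInv p c → (∀ bs ∈ L, bs ∈ p.keys) →
    ∃ p' gout, L.foldl pvGroupStepA (some (p, g)) = some (p', gout) ∧
      L.foldl (pvGroupStepB c) (some g) = some gout := by
  intro L
  induction L with
  | nil => intro p c g _ _ _; exact ⟨p, g, rfl, rfl⟩
  | cons bs rest ih =>
      intro p c g hwf hinv hmem
      have hbs : bs ∈ p.keys := hmem bs (by simp)
      obtain ⟨p2, hf, hk, hwf2, hr2⟩ := pvFindTop_spec p bs hwf hbs
      have hget : c.get? bs = some (pvRoot p bs) := hinv.2 bs hbs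
      have hinv2 : pvInv p2 c := by
        refine ⟨hinv.1.trans hk.symm, fun y hy => ?_⟩
        rw [hk] at hy
        rw [hinv.2 y hy, hr2 y]
      have hsetd : g.setdefault (pvRoot p bs) ([] : PySem.Set Int) =
          (if g.contains (pvRoot p bs) then g
           else g.insert (pvRoot p bs) ([] : PySem.Set Int)) := by
        by_cases hc : g.contains (pvRoot p bs) = true
        · rw [PySem.Dict.setdefault_of_contains g _ hc, if_pos hc]
        · rw [PySem.Dict.setdefault_of_not_contains g _ (by simpa using hc), if_neg hc]
      obtain ⟨p', gout, hA, hB⟩ := ih p2 c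
        ((if g.contains (pvRoot p bs) then g
          else g.insert (pvRoot p bs) ([] : PySem.Set Int)).modify (pvRoot p bs) []
          (fun s => PySem.Set.add s bs))
        hwf2 hinv2 (fun z hz => by rw [hk]; exact hmem z (by simp [hz]))
      refine ⟨p', gout, ?_, ?_⟩
      · simp only [List.foldl_cons, pvGroupStepA, hf, hA]
      · simp only [List.foldl_cons, pvGroupStepB, hget, hsetd, hB]

theorem pvInit_get? (y : Int) : ∀ (L : List Int) (d : PySem.Dict Int Int),
    (L.foldl (fun d bs => d.insert bs bs) d).get? y = if y ∈ L then some y else d.get? y := by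
  intro L
  induction L with
  | nil => intro d; simp
  | cons b rest ih =>
      intro d
      simp only [List.foldl_cons]
      rw [ih (d.insert b b)]
      by_cases hyr : y ∈ rest
      · simp [hyr]
      · rw [if_neg hyr, PySem.Dict.get?_insert]
        by_cases hyb : y = b
        · simp [hyb]
        · simp [List.mem_cons, hyb, hyr]

-- ===== VERDICT (by name: the statement is the Claim_ definition above) =====
theorem format_kernel_classes_spec : Claim_equal_format_kernel_classes := by
  intro eps bss _ hpre
  unfold Spec_format_kernel_classes
  have hg0 : ∀ y, (bss.foldl (fun d bs => d.insert bs bs) PySem.Dict.empty).get? y =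
      if y ∈ bss then some y else none := by
    intro y
    rw [pvInit_get? y bss PySem.Dict.empty, PySem.Dict.get?_empty]
  have hmem0 : ∀ y, y ∈ (bss.foldl (fun d bs => d.insert bs bs) PySem.Dict.empty).keys ↔
      y ∈ bss := by
    intro y
    have h1 := PySem.Dict.get?_eq_none_iff_not_mem_keys
      (bss.foldl (fun d bs => d.insert bs bs) PySem.Dict.empty) y
    rw [hg0 y] at h1
    by_cases hy : y ∈ bss
    · simp [hy] at h1
      simp [hy, h1]
    · simp [hy] at h1
      simp [hy, h1]
  have hnodup0 : (bss.foldl (fun d bs => d.insert bs bs) PySem.Dict.empty).keys.Nodup :=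
    PySem.Dict.nodup_keys_foldl_insert bss (fun _ x => x) PySem.Dict.empty
      PySem.Dict.nodup_keys_empty
  have hroot0 : ∀ y ∈ (bss.foldl (fun d bs => d.insert bs bs) PySem.Dict.empty).keys,
      pvIsRoot (bss.foldl (fun d bs => d.insert bs bs) PySem.Dict.empty) y := by
    intro y hy
    unfold pvIsRoot pvStep
    rw [PySem.Dict.getD_eq_get?_getD, hg0 y, if_pos ((hmem0 y).mp hy)]
    rfl
  have hwf0 : pvWF (bss.foldl (fun d bs => d.insert bs bs) PySem.Dict.empty) := by
    refine ⟨hnodup0, fun k hk => ⟨?_, 0, hroot0 k hk⟩⟩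
    rw [hroot0 k hk]
    exact hk
  have hinv0 : pvInv (bss.foldl (fun d bs => d.insert bs bs) PySem.Dict.empty)
      (bss.foldl (fun d bs => d.insert bs bs) PySem.Dict.empty) := by
    refine ⟨rfl, fun y hy => ?_⟩
    rw [hg0 y, if_pos ((hmem0 y).mp hy), pvRoot_of_isRoot _ y (hroot0 y hy)]
  obtain ⟨p1, c1, hA, hB, hwf1, hk1, hinv1⟩ :=
    pvPairs_fold eps _ _ hwf0 hinv0 (fun pr hpr =>
      ⟨(hmem0 pr.1).mpr (hpre pr hpr).1, (hmem0 pr.2).mpr (hpre pr hpr).2⟩)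
  obtain ⟨p2, gout, hGA, hGB⟩ := pvGroup_fold bss p1 c1 PySem.Dict.empty hwf1 hinv1
    (fun z hz => by rw [hk1]; exact (hmem0 z).mpr hz)
  show format_kernel_classes eps bss = format_kernel_classes_alt eps bss
  unfold format_kernel_classes format_kernel_classes_alt
  simp only [hA, hB, hGA, hGB]
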